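-- pv_equiv track=rewrite | github.com/mitsuo0114/competitive_programming | python/atcoder/NIKKEI Programming Contest 2019/B.py | solve
-- ===== SOURCE A (Python) =====
-- def solve(N, A, B, C):
--     ans = 0
--     for a, b, c in zip(A, B, C):
--         if a == b and b == c and a == c:
--             pass
--         elif a == b or b == c or a == c:
--             ans += 1
--         else:
--             ans += 2
--     return ans
-- ===== SOURCE B (Python) =====
-- def solve(N, A, B, C):
--     # Inclusion-exclusion: each triple contributes 2 - [a==b] - [b==c] - [a==c] + [a==b==c],
--     # since the number of equal pairs in a triple is 0, 1 or 3.
--     triples = list(zip(A, B, C))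
--     n = len(triples)
--     ab = sum(1 for a, b, _ in triples if a == b)
--     bc = sum(1 for _, b, c in triples if b == c)
--     ac = sum(1 for a, _, c in triples if a == c)
--     abc = sum(1 for a, b, c in triples if a == b == c)
--     return 2 * n - ab - bc - ac + abc
-- ===== Notes on version B (the rewrite author's own statement) =====
-- stated objective: alternative
-- what changed: Replaces the per-triple if/elif/else cascade with four separate counting passes (pairs a==b, b==c, a==c and all-equal triples) combined by the closed inclusion-exclusion formula 2n - ab - bc - ac + abc.
import Mathlib
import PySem

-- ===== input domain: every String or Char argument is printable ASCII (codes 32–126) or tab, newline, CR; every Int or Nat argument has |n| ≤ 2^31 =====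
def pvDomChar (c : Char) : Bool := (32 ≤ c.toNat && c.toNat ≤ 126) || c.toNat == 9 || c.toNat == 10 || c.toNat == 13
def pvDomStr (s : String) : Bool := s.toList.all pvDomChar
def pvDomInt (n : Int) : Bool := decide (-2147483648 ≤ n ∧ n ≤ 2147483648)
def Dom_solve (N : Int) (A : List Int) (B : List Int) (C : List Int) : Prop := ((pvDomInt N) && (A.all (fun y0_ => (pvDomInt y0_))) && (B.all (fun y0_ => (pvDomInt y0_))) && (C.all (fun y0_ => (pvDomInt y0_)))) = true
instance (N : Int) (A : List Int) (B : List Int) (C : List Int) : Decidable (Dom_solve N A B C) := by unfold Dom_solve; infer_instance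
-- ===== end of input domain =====

-- B replaces A's per-triple branch cascade with four staged counting passes combined by inclusion-exclusion; objective: alternative.

-- ===== PORT A =====
-- for a, b, c in zip(A, B, C): if/elif/else cascade updating ans
def solve (N : Int) (A : List Int) (B : List Int) (C : List Int) : Int :=
  (A.zip (B.zip C)).foldl
    (fun ans p =>
      let a := p.1; let b := p.2.1; let c := p.2.2
      if a = b ∧ b = c ∧ a = c then ans
      else if a = b ∨ b = c ∨ a = c then ans + 1
      else ans + 2) 0

-- ===== PORT B =====
-- triples = list(zip(A,B,C)); four counting passes; return 2*n - ab - bc - ac + abc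
def solve_alt (N : Int) (A : List Int) (B : List Int) (C : List Int) : Int :=
  let triples := A.zip (B.zip C)
  let n : Int := triples.length
  let ab : Int := (triples.countP (fun p => p.1 == p.2.1) : Nat)
  let bc : Int := (triples.countP (fun p => p.2.1 == p.2.2) : Nat)
  let ac : Int := (triples.countP (fun p => p.1 == p.2.2) : Nat)
  let abc : Int := (triples.countP (fun p => p.1 == p.2.1 && p.2.1 == p.2.2) : Nat)
  2 * n - ab - bc - ac + abc

-- ===== PRECONDITION & SPEC =====
def Spec_solve (N : Int) (A : List Int) (B : List Int) (C : List Int) (out : Int) : Prop := out = solve_alt N A B C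
instance (N : Int) (A : List Int) (B : List Int) (C : List Int) (out : Int) : Decidable (Spec_solve N A B C out) := by unfold Spec_solve; infer_instance

-- ===== CLAIM (what is proved, stated in full; the proofs are below) =====
def Claim_equal_solve : Prop := ∀ (N : Int) (A : List Int) (B : List Int) (C : List Int), Dom_solve N A B C → Spec_solve N A B C (solve N A B C)

-- ===== LEMMAS AND PROOFS =====

-- A's fold equals the inclusion-exclusion combination of the four counts, for any accumulator
theorem pv_fold (L : List (Int × Int × Int)) (acc : Int) :
    L.foldl
      (fun ans p =>
        let a := p.1; let b := p.2.1; let c := p.2.2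
        if a = b ∧ b = c ∧ a = c then ans
        else if a = b ∨ b = c ∨ a = c then ans + 1
        else ans + 2) acc
    = acc + 2 * (L.length : Int)
        - (L.countP (fun p => p.1 == p.2.1) : Nat)
        - (L.countP (fun p => p.2.1 == p.2.2) : Nat)
        - (L.countP (fun p => p.1 == p.2.2) : Nat)
        + (L.countP (fun p => p.1 == p.2.1 && p.2.1 == p.2.2) : Nat) := by
  induction L generalizing acc with
  | nil => simp
  | cons h t ih =>
    obtain ⟨a, b, c⟩ := h
    simp only [List.foldl_cons, List.countP_cons, List.length_cons, ih]
    by_cases hab : a = b <;> by_cases hbc : b = c <;> by_cases hac : a = c <;>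
      simp [hab, hbc, hac] <;> omega

-- ===== VERDICT (by name: the statement is the Claim_ definition above) =====
theorem solve_spec : Claim_equal_solve := by
  intro N A B C _
  unfold Spec_solve solve solve_alt
  simp only [pv_fold]
  ring
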